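-- pv_equiv track=rewrite | github.com/ajdinm/crypto | python/polynomial.py | max_polynomial
-- ===== SOURCE A (Python) =====
-- def max_polynomial(a, b):
--     if len(a) == 0 and len(b) == 0:
--         return a
--     if len(b) == 0:
--         return a
--     if len(a) == 0:
--         return b
--
--     a_deg = sorted(get_polynomial_degree(a), reverse=True)
--     b_deg = sorted(get_polynomial_degree(b), reverse=True) # desc
--
--     smaller_array = a_deg
--     greater_array = b_deg
--     original_small = a
--     original_great = b
--
--     if len(b_deg) < len(smaller_array):
--         smaller_array = b_deg
--         greater_array = a_deg
--         original_small = b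
--         original_great = a
--
--     for i in range(len(smaller_array)):
--         if smaller_array[i] > greater_array[i]:
--             return original_small
--         if smaller_array[i] < greater_array[i]:
--             return original_great
--     return original_great
--
-- def get_polynomial_degree(polynomial):
--     polynomial = filter(lambda x: x[1] != 0, enumerate(polynomial))
--     polynomial = map(lambda x: x[0], polynomial) # get index of non zero elements in poly
--
--     return polynomial
-- ===== SOURCE B (Python) =====
-- def max_polynomial(a, b):
--     if len(b) == 0:
--         return a
--     a_exp = {i for i, c in enumerate(a) if c != 0}
--     b_exp = {i for i, c in enumerate(b) if c != 0}
--     diff = a_exp ^ b_exp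
--     if not diff:
--         return b
--     return a if max(diff) in a_exp else b
-- ===== Notes on version B (the rewrite author's own statement) =====
-- stated objective: alternative
-- what changed: Replaces A's sort-both-exponent-lists-descending plus lexicographic prefix scan (with a length-based swap) by a direct set computation: the polynomial owning the maximum of the symmetric difference of the nonzero-exponent sets wins, ties go to b.
import Mathlib
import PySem

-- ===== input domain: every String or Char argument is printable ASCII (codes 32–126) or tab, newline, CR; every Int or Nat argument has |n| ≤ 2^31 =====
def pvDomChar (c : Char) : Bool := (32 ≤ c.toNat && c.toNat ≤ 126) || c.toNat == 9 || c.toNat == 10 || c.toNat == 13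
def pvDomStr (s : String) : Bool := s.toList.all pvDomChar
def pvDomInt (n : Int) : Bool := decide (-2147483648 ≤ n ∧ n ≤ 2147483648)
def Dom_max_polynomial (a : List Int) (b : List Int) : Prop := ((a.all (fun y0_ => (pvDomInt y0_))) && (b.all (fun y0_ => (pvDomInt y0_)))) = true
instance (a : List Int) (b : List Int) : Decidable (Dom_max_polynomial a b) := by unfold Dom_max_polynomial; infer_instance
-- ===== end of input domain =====

-- B replaces A's double descending sort + lexicographic prefix scan by picking the owner of
-- max(symmetric difference of the nonzero-exponent sets); objective: alternative algorithm.

-- ===== PORT A =====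
def get_polynomial_degree (polynomial : List Int) : List Int :=
  ((PySem.List.enumerate polynomial).filter (fun x => x.2 != 0)).map (fun x => x.1)

-- the 'for i in range(len(smaller_array))' loop with its two early returns
def mploop : List Int → List Int → List Int → List Int → List Int
  | x :: s, y :: g, os, og =>
      if x > y then os else if x < y then og else mploop s g os og
  | _, _, _, og => og

def max_polynomial (a : List Int) (b : List Int) : List Int :=
  if a.length = 0 ∧ b.length = 0 then a
  else if b.length = 0 then a
  else if a.length = 0 then b
  else
    let a_deg := PySem.List.sorted (get_polynomial_degree a) (fun x => x) true
    let b_deg := PySem.List.sorted (get_polynomial_degree b) (fun x => x) true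
    if b_deg.length < a_deg.length then mploop b_deg a_deg b a
    else mploop a_deg b_deg a b

-- ===== PORT B =====
def max_polynomial_alt (a : List Int) (b : List Int) : List Int :=
  if b.length = 0 then a
  else
    let a_exp : PySem.Set Int :=
      PySem.Set.ofList (((PySem.List.enumerate a).filter (fun x => x.2 != 0)).map (fun x => x.1))
    let b_exp : PySem.Set Int :=
      PySem.Set.ofList (((PySem.List.enumerate b).filter (fun x => x.2 != 0)).map (fun x => x.1))
    let diff := PySem.Set.symmDiff a_exp b_exp
    match PySem.List.max? diff (fun x => x) with
    | none => b
    | some m => if PySem.Set.contains a_exp m then a else b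

-- ===== PRECONDITION & SPEC =====
def Spec_max_polynomial (a : List Int) (b : List Int) (out : List Int) : Prop := out = max_polynomial_alt a b
instance (a : List Int) (b : List Int) (out : List Int) : Decidable (Spec_max_polynomial a b out) := by unfold Spec_max_polynomial; infer_instance

-- ===== CLAIM (what is proved, stated in full; the proofs are below) =====
def Claim_equal_max_polynomial : Prop := ∀ (a : List Int) (b : List Int), Dom_max_polynomial a b → Spec_max_polynomial a b (max_polynomial a b)

-- ===== LEMMAS AND PROOFS =====

theorem gpd_pairwise (p : List Int) : (get_polynomial_degree p).Pairwise (· < ·) := by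
  unfold get_polynomial_degree
  exact List.pairwise_map.mpr (List.Pairwise.filter _ (PySem.List.pairwise_lt_enumerate p 0))

theorem gpd_nodup (p : List Int) : (get_polynomial_degree p).Nodup :=
  (gpd_pairwise p).imp ne_of_lt

theorem sorted_gpd (p : List Int) :
    PySem.List.sorted (get_polynomial_degree p) (fun x => x) true
      = (get_polynomial_degree p).reverse :=
  PySem.List.sorted_rev_eq_of_perm_of_pairwise_gt _ _ (fun x => x) (List.reverse_perm _)
    (List.pairwise_reverse.mpr (gpd_pairwise p))

theorem mem_symmDiff' (s t : List Int) (x : Int) :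
    x ∈ PySem.Set.symmDiff s t ↔ (x ∈ s ∧ x ∉ t) ∨ (x ∈ t ∧ x ∉ s) := by
  simp [PySem.Set.symmDiff, PySem.Set.mem_diff, List.mem_append]

theorem max?_congr_mem (l l' : List Int) (h : ∀ x : Int, x ∈ l ↔ x ∈ l') :
    PySem.List.max? l (fun x => x) = PySem.List.max? l' (fun x => x) := by
  cases hl : PySem.List.max? l (fun x => x) with
  | none =>
    have hl0 : l = [] := (PySem.List.max?_eq_none_iff _ _).mp hl
    subst hl0
    symm
    rw [PySem.List.max?_eq_none_iff]
    cases hl' : l' with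
    | nil => rfl
    | cons y t =>
      exact absurd ((h y).mpr (by simp [hl'])) (by simp)
  | some m =>
    cases hl' : PySem.List.max? l' (fun x => x) with
    | none =>
      have hl0 : l' = [] := (PySem.List.max?_eq_none_iff _ _).mp hl'
      have hm : m ∈ l := PySem.List.max?_mem hl
      exact absurd ((h m).mp hm) (by simp [hl0])
    | some m' =>
      have hm : m ∈ l := PySem.List.max?_mem hl
      have hm' : m' ∈ l' := PySem.List.max?_mem hl'
      have h1 : m ≤ m' := PySem.List.max?_isMax hl' m ((h m).mp hm)
      have h2 : m' ≤ m := PySem.List.max?_isMax hl m' ((h m').mpr hm')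
      rw [le_antisymm h1 h2]

theorem mploop_eq (s : List Int) : ∀ (g os og : List Int),
    s.Pairwise (fun u v => v < u) → g.Pairwise (fun u v => v < u) →
    s.length ≤ g.length →
    mploop s g os og
      = match PySem.List.max? (PySem.Set.symmDiff s g) (fun x => x) with
        | none => og
        | some m => if m ∈ s then os else og := by
  induction s with
  | nil =>
    intro g os og _ _ _
    cases hd : PySem.List.max? (PySem.Set.symmDiff ([] : List Int) g) (fun x => x) with
    | none => cases g <;> simp [mploop]
    | some m => cases g <;> simp [mploop]
  | cons x s ih =>
    intro g os og hs hg hlen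
    cases g with
    | nil => simp at hlen
    | cons y g =>
      rcases List.pairwise_cons.mp hs with ⟨hxall, hs'⟩
      rcases List.pairwise_cons.mp hg with ⟨hyall, hg'⟩
      rcases lt_trichotomy x y with hxy | hxy | hxy
      · -- x < y : loop returns og; max of symmdiff is in g's side
        have hyns : y ∉ x :: s := by
          intro hmem
          rcases List.mem_cons.mp hmem with h0 | h0
          · omega
          · have := hxall y h0; omega
        have hyd : y ∈ PySem.Set.symmDiff (x :: s) (y :: g) :=
          (mem_symmDiff' _ _ y).mpr (Or.inr ⟨List.mem_cons_self .., hyns⟩)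
        cases hd : PySem.List.max? (PySem.Set.symmDiff (x :: s) (y :: g)) (fun x => x) with
        | none =>
          rw [PySem.List.max?_eq_none_iff] at hd
          simp [hd] at hyd
        | some m =>
          have hym : y ≤ m := PySem.List.max?_isMax hd y hyd
          have hmd := PySem.List.max?_mem hd
          have hmns : m ∉ x :: s := by
            intro hmem
            rcases List.mem_cons.mp hmem with h0 | h0
            · omega
            · have := hxall m h0; omega
          simp [mploop, hxy, not_lt_of_gt hxy, hmns]
      · -- x = y : common head, recurse
        subst hxy
        have hxns : x ∉ s := fun h0 => absurd (hxall x h0) (by omega)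
        have hxng : x ∉ g := fun h0 => absurd (hyall x h0) (by omega)
        have hmem : ∀ z : Int, z ∈ PySem.Set.symmDiff (x :: s) (x :: g) ↔ z ∈ PySem.Set.symmDiff s g := by
          intro z
          rw [mem_symmDiff', mem_symmDiff']
          by_cases hz : z = x
          · subst hz; simp [hxns, hxng]
          · simp [List.mem_cons, hz]
        have hmax := max?_congr_mem _ _ hmem
        have hloop : mploop (x :: s) (x :: g) os og = mploop s g os og := by
          simp [mploop]
        rw [hloop, ih g os og hs' hg' (by simpa using hlen), ← hmax]
        cases hd : PySem.List.max? (PySem.Set.symmDiff (x :: s) (x :: g)) (fun x => x) with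
        | none => rfl
        | some m =>
          have hmd := PySem.List.max?_mem hd
          have hmne : m ≠ x := by
            intro h0; subst h0
            rcases (mem_symmDiff' _ _ m).mp ((hmem m).mp hmd) with ⟨h1, _⟩ | ⟨h1, _⟩
            · exact hxns h1
            · exact hxng h1
          simp [List.mem_cons, hmne]
      · -- x > y : loop returns os; max of symmdiff is in s's side
        have hxng : x ∉ y :: g := by
          intro hmem
          rcases List.mem_cons.mp hmem with h0 | h0
          · omega
          · have := hyall x h0; omega
        have hxd : x ∈ PySem.Set.symmDiff (x :: s) (y :: g) :=
          (mem_symmDiff' _ _ x).mpr (Or.inl ⟨List.mem_cons_self .., hxng⟩)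
        cases hd : PySem.List.max? (PySem.Set.symmDiff (x :: s) (y :: g)) (fun x => x) with
        | none =>
          rw [PySem.List.max?_eq_none_iff] at hd
          simp [hd] at hxd
        | some m =>
          have hxm : x ≤ m := PySem.List.max?_isMax hd x hxd
          have hmd := PySem.List.max?_mem hd
          have hms : m ∈ x :: s := by
            rcases (mem_symmDiff' _ _ m).mp hmd with ⟨h1, _⟩ | ⟨h1, _⟩
            · exact h1
            · exfalso
              rcases List.mem_cons.mp h1 with h0 | h0
              · omega
              · have := hyall m h0; omega
          simp [mploop, hxy, hms]

-- ===== VERDICT (by name: the statement is the Claim_ definition above) =====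
theorem max_polynomial_spec : Claim_equal_max_polynomial := by
  intro a b _
  unfold Spec_max_polynomial max_polynomial max_polynomial_alt
  by_cases hb : b.length = 0
  · simp [hb]
  · simp only [hb, if_false]
    by_cases ha : a.length = 0
    · have ha' : a = [] := List.length_eq_zero_iff.mp ha
      subst ha'
      simp only [ha, if_false, if_true, and_false]
      simp only [PySem.List.enumerate_nil, List.filter_nil, List.map_nil]
      cases hd : PySem.List.max? (PySem.Set.symmDiff (PySem.Set.ofList ([] : List Int))
          (PySem.Set.ofList (((PySem.List.enumerate b).filter (fun x => x.2 != 0)).map (fun x => x.1)))) (fun x => x) with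
      | none => simp
      | some m => simp [PySem.Set.ofList, PySem.Set.contains]
    · have hnab : ¬ (a.length = 0 ∧ b.length = 0) := by tauto
      simp only [if_false, ha]
      rw [sorted_gpd a, sorted_gpd b]
      have hLa : PySem.Set.ofList (((PySem.List.enumerate a).filter (fun x => x.2 != 0)).map (fun x => x.1))
          = get_polynomial_degree a := PySem.Set.ofList_eq_self_of_nodup _ (gpd_nodup a)
      have hLb : PySem.Set.ofList (((PySem.List.enumerate b).filter (fun x => x.2 != 0)).map (fun x => x.1))
          = get_polynomial_degree b := PySem.Set.ofList_eq_self_of_nodup _ (gpd_nodup b)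
      rw [hLa, hLb]
      set La := get_polynomial_degree a with hLadef
      set Lb := get_polynomial_degree b with hLbdef
      have hpa : La.reverse.Pairwise (fun u v => v < u) := List.pairwise_reverse.mpr (gpd_pairwise a)
      have hpb : Lb.reverse.Pairwise (fun u v => v < u) := List.pairwise_reverse.mpr (gpd_pairwise b)
      by_cases hlt : Lb.reverse.length < La.reverse.length
      · -- swap case: b_deg shorter
        rw [if_pos hlt]
        rw [mploop_eq Lb.reverse La.reverse b a hpb hpa (le_of_lt hlt)]
        have hmem : ∀ z : Int, z ∈ PySem.Set.symmDiff Lb.reverse La.reverse ↔ z ∈ PySem.Set.symmDiff La Lb := by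
          intro z
          rw [mem_symmDiff', mem_symmDiff']
          simp [List.mem_reverse]
          tauto
        rw [max?_congr_mem _ _ hmem]
        cases hd : PySem.List.max? (PySem.Set.symmDiff La Lb) (fun x => x) with
        | none =>
          exfalso
          rw [PySem.List.max?_eq_none_iff] at hd
          have hiff : ∀ z : Int, z ∈ La ↔ z ∈ Lb := by
            intro z
            have := (mem_symmDiff' La Lb z)
            rw [hd] at this
            simp at this
            tauto
          have hperm : La.Perm Lb :=
            (List.perm_ext_iff_of_nodup (gpd_nodup a) (gpd_nodup b)).mpr hiff
          have := hperm.length_eq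
          simp at hlt
          omega
        | some m =>
          have hmd := PySem.List.max?_mem hd
          rcases (mem_symmDiff' _ _ m).mp hmd with ⟨h1, h2⟩ | ⟨h1, h2⟩
          · simp [List.mem_reverse, h1, h2]
          · simp [List.mem_reverse, h1, h2]
      · rw [if_neg hlt]
        rw [mploop_eq La.reverse Lb.reverse a b hpa hpb (by simp at hlt ⊢; omega)]
        have hmem : ∀ z : Int, z ∈ PySem.Set.symmDiff La.reverse Lb.reverse ↔ z ∈ PySem.Set.symmDiff La Lb := by
          intro z
          rw [mem_symmDiff', mem_symmDiff']
          simp [List.mem_reverse]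
        rw [max?_congr_mem _ _ hmem]
        cases hd : PySem.List.max? (PySem.Set.symmDiff La Lb) (fun x => x) with
        | none => rfl
        | some m => simp [List.mem_reverse]
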